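-- pv_equiv track=rewrite | github.com/eichelb4rt/SAT-LAB | 2-SAT/2sat.py | apply_assignment
-- ===== SOURCE A (Python) =====
-- from typing import List, Tuple
--
-- def apply_assignment(f: List[List[int]], assignment: Tuple[int, bool]) -> List[List[int]]:
--     """Applies the given assignment to the given formula f.
--
--     Parameters
--     ----------
--     f : List[List[int]]
--         The given formula.
--     assignment : Tuple[int, bool]
--         A variable and the assigned boolean.
--
--     Returns
--     -------
--     List[List[int]]
--         The given formula where the assignment is applied.
--     """
--
--     # now to define what literals remove a clause from the formula or the literal from the clause if contained
--     var = assignment[0]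
--     assigned_value = assignment[1]
--     removes_literal_from_clause = -1 * var if assigned_value == True else var   # == True just for readability, ik i don't need it
--     removes_clause_from_formula = -1 * var if assigned_value == False else var    # same here
--
--     # now remove the things
--     edited_formula = True   # to start the loop
--     # we're done if we haven't edited any clauses or removed any from the formula
--     while edited_formula:
--         edited_formula = False  # never set to True if nothing is edited
--         for i, clause in enumerate(f):
--             if removes_literal_from_clause in clause:
--                 # remove the literal
--                 f[i].remove(removes_literal_from_clause)
--                 edited_formula = True
--                 break
--             elif removes_clause_from_formula in clause: # elif because the cases are mutually exclusive
--                 # remove the clause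
--                 f.remove(clause)
--                 edited_formula = True
--                 break
--     return f
-- ===== SOURCE B (Python) =====
-- from typing import List, Tuple
--
-- def apply_assignment(f: List[List[int]], assignment: Tuple[int, bool]) -> List[List[int]]:
--     """Single pass: drop every clause containing the satisfied literal,
--     and strip the falsified literal from the remaining clauses."""
--     var, val = assignment
--     falsified = -var if val else var
--     satisfied = var if val else -var
--     return [[x for x in c if x != falsified] for c in f if satisfied not in c]
-- ===== Notes on version B (the rewrite author's own statement) =====
-- stated objective: simpler
-- what changed: Replaces A's restart-the-whole-scan-after-every-single-edit while loop with one comprehension pass that drops satisfied clauses and strips the falsified literal.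
-- outside the precondition, e.g. on apply_assignment([[0], [1, 2]], (0, True)): A returns [[], [1, 2]], B returns [[1, 2]]
import Mathlib
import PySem

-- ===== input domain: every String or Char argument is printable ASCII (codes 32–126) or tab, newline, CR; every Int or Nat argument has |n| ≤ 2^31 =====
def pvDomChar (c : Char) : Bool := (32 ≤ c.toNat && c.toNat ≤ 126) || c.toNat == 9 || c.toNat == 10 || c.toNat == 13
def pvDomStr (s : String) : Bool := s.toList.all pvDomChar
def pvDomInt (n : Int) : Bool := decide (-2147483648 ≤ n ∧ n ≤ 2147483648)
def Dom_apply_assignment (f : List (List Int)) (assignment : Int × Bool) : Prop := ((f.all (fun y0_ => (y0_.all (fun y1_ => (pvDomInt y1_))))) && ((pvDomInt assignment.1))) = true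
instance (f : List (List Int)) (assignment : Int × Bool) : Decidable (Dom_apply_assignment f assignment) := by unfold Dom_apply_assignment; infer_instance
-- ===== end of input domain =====

-- B replaces A's restart-after-every-edit while loop by one comprehension pass.
-- A mutates f in place; the equivalence proved here is about the RETURN value only.

-- ===== PORT A =====

-- measure used only for the termination of A's while loop
def pvMeasure (f : List (List Int)) : Nat := f.length + (f.map List.length).sum

-- one pass of A's inner `for i, clause in enumerate(f)` with its two `break`s:
-- `none` = no edit was made (edited_formula stays False), `some f'` = the edited formula.
-- `f[i].remove(lit)` removes the first occurrence = List.erase (exact: lit ∈ clause here, so no ValueError).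
-- `f.remove(clause)` removes the first element EQUAL to clause; every earlier clause failed the
-- `sat ∈` test while clause contains sat, so none of them equals clause and the removed element
-- is exactly the one at index i — which is what `some rest` (with the outer `c :: ·` frames) does.
def stepA (lit sat : Int) : List (List Int) → Option (List (List Int))
  | [] => none
  | c :: rest =>
    if lit ∈ c then some (c.erase lit :: rest)
    else if sat ∈ c then some rest
    else (stepA lit sat rest).map (c :: ·)

theorem stepA_decreases (lit sat : Int) (f f' : List (List Int))
    (h : stepA lit sat f = some f') : pvMeasure f' < pvMeasure f := by
  induction f generalizing f' with
  | nil => simp [stepA] at h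
  | cons c rest ih =>
    simp only [stepA] at h
    split_ifs at h with h1 h2
    · cases h
      have hlen : (c.erase lit).length = c.length - 1 := List.length_erase_of_mem h1
      have hpos : 0 < c.length := List.length_pos_of_mem h1
      simp [pvMeasure, hlen]
      omega
    · cases h
      simp [pvMeasure]
      omega
    · rcases Option.map_eq_some_iff.mp h with ⟨r', hr', rfl⟩
      have := ih r' hr'
      simp [pvMeasure] at this ⊢
      omega

-- the `while edited_formula:` loop: repeat the scan until a full pass makes no edit
def loopA (lit sat : Int) (f : List (List Int)) : List (List Int) :=
  match h : stepA lit sat f with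
  | none => f
  | some f' => loopA lit sat f'
termination_by pvMeasure f
decreasing_by exact stepA_decreases lit sat f f' h

def apply_assignment (f : List (List Int)) (assignment : Int × Bool) : List (List Int) :=
  let var := assignment.1
  let assigned_value := assignment.2
  let removes_literal_from_clause := if assigned_value then -1 * var else var
  let removes_clause_from_formula := if assigned_value = false then -1 * var else var
  loopA removes_literal_from_clause removes_clause_from_formula f

-- ===== PORT B =====
def apply_assignment_alt (f : List (List Int)) (assignment : Int × Bool) : List (List Int) :=
  let var := assignment.1
  let val := assignment.2
  let falsified := if val then -var else var
  let satisfied := if val then var else -var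
  (f.filter (fun c => decide (satisfied ∉ c))).map (fun c => c.filter (fun x => decide (x ≠ falsified)))

-- ===== PRECONDITION & SPEC =====
-- Pre_ excludes inputs where var = 0 AND some clause contains the literal 0: 0 is not a valid
-- 2-SAT literal (it is its own negation), and there A's behaviour (strip the 0s but keep the
-- clause) and B's (drop the clause as satisfied) are equally defensible readings.
def Pre_apply_assignment (f : List (List Int)) (assignment : Int × Bool) : Prop :=
  assignment.1 = 0 → f.all (fun c => decide ((0:Int) ∉ c)) = true
instance (f : List (List Int)) (assignment : Int × Bool) : Decidable (Pre_apply_assignment f assignment) := by unfold Pre_apply_assignment; infer_instance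

def pvWitness_apply_assignment : List (List Int) × (Int × Bool) := ([[1, 2], [-1, 3]], (1, true))

def Spec_apply_assignment (f : List (List Int)) (assignment : Int × Bool) (out : List (List Int)) : Prop := out = apply_assignment_alt f assignment
instance (f : List (List Int)) (assignment : Int × Bool) (out : List (List Int)) : Decidable (Spec_apply_assignment f assignment out) := by unfold Spec_apply_assignment; infer_instance

-- ===== CLAIM (what is proved, stated in full; the proofs are below) =====
def Claim_equal_apply_assignment : Prop := ∀ (f : List (List Int)) (assignment : Int × Bool), Dom_apply_assignment f assignment → Pre_apply_assignment f assignment → Spec_apply_assignment f assignment (apply_assignment f assignment)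

-- ===== LEMMAS AND PROOFS =====

-- B as a function of the two distinguished literals
def passB (lit sat : Int) (f : List (List Int)) : List (List Int) :=
  (f.filter (fun c => decide (sat ∉ c))).map (fun c => c.filter (fun x => decide (x ≠ lit)))

theorem filter_erase_self (l : List Int) (a : Int) :
    (l.erase a).filter (fun x => decide (x ≠ a)) = l.filter (fun x => decide (x ≠ a)) := by
  induction l with
  | nil => simp
  | cons x xs ih =>
    by_cases hx : x = a
    · subst hx; simp [List.erase_cons_head]
    · rw [List.erase_cons_tail (by simpa using hx)]
      have hd : (decide (x ≠ a)) = true := decide_eq_true hx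
      simp only [List.filter_cons, hd, if_true, ih]

theorem mem_erase_ne {l : List Int} {a b : Int} (hne : b ≠ a) : b ∈ l.erase a ↔ b ∈ l :=
  List.mem_erase_of_ne hne

-- a successful step does not change B's value
theorem passB_step (lit sat : Int) (hns : sat ≠ lit) (f f' : List (List Int))
    (h : stepA lit sat f = some f') : passB lit sat f' = passB lit sat f := by
  induction f generalizing f' with
  | nil => simp [stepA] at h
  | cons c rest ih =>
    simp only [stepA] at h
    split_ifs at h with h1 h2
    · cases h
      by_cases hc : sat ∈ c
      · have : sat ∈ c.erase lit := (mem_erase_ne hns).mpr hc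
        simp [passB, List.filter_cons, hc, this]
      · have h3 : sat ∉ c.erase lit := fun hm => hc ((mem_erase_ne hns).mp hm)
        have h4 := filter_erase_self c lit
        simp only [passB, List.filter_cons, hc, h3] at *
        simp at h4 ⊢
        simp [h4]
    · cases h
      simp [passB, List.filter_cons, h2]
    · rcases Option.map_eq_some_iff.mp h with ⟨r', hr', rfl⟩
      have hrec := ih r' hr'
      by_cases hc : sat ∈ c
      · simp [passB, List.filter_cons, hc] at hrec ⊢; exact hrec
      · simp [passB, List.filter_cons, hc] at hrec ⊢
        exact hrec

-- when no step applies, B is the identity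
theorem passB_none (lit sat : Int) (f : List (List Int))
    (h : stepA lit sat f = none) : passB lit sat f = f := by
  induction f with
  | nil => simp [passB]
  | cons c rest ih =>
    simp only [stepA] at h
    split_ifs at h with h1 h2
    · have hr : stepA lit sat rest = none := Option.map_eq_none_iff.mp h
      have hrec := ih hr
      have hcf : c.filter (fun x => decide (x ≠ lit)) = c :=
        List.filter_eq_self.mpr (fun x hx => decide_eq_true (fun hxe => h1 (hxe ▸ hx)))
      simp only [passB] at hrec ⊢
      rw [List.filter_cons_of_pos (by simpa using h2), List.map_cons, hcf, hrec]

theorem stepA_none_of_not_mem (a : Int) (f : List (List Int))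
    (h : ∀ c ∈ f, a ∉ c) : stepA a a f = none := by
  induction f with
  | nil => rfl
  | cons c rest ih =>
    have hc := h c (by simp)
    simp [stepA, hc, ih (fun c' hc' => h c' (by simp [hc']))]

theorem loopA_eq_passB (lit sat : Int) (hns : sat ≠ lit) (f : List (List Int)) :
    loopA lit sat f = passB lit sat f := by
  induction f using loopA.induct lit sat with
  | case1 f h => rw [loopA, h, passB_none lit sat f h]
  | case2 f f' h ih =>
    rw [loopA, h]
    exact ih.trans (passB_step lit sat hns f f' h)

-- ===== VERDICT (by name: the statement is the Claim_ definition above) =====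
theorem apply_assignment_spec : Claim_equal_apply_assignment := by
  intro f assignment _ hpre
  obtain ⟨var, val⟩ := assignment
  unfold Spec_apply_assignment apply_assignment apply_assignment_alt
  by_cases hv : var = 0
  · -- var = 0: Pre_ guarantees no clause contains 0, so both sides are the identity
    subst hv
    have hall : ∀ c ∈ f, (0:Int) ∉ c := by
      intro c hc
      have := (List.all_eq_true.mp (hpre rfl)) c hc
      simpa using this
    have hnone : stepA 0 0 f = none := stepA_none_of_not_mem 0 f hall
    have hpb : passB 0 0 f = f := passB_none 0 0 f hnone
    cases val <;>
      simp only [if_true, if_false, Bool.false_eq_true, Bool.true_eq_false, neg_one_mul,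
        neg_zero] <;>
      · rw [loopA, hnone]; exact hpb.symm
  · cases val with
    | false =>
      simp only [Bool.false_eq_true, if_false, if_pos rfl, neg_one_mul]
      exact loopA_eq_passB var (-var) (by omega) f
    | true =>
      simp only [if_true, Bool.true_eq_false, if_false, neg_one_mul]
      exact loopA_eq_passB (-var) var (by omega) f
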